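-- pv_equiv track=rewrite | github.com/alimurtadho/flask_api | optimizer.py | GenerateNeurons
-- ===== SOURCE A (Python) =====
-- import itertools
--
-- def GenerateNeurons(number_of_layers=1, min_neurons=3, max_neurons=50):
--     layers = []
--     for i in range(min_neurons, max_neurons+1):
--         layers.append((i,))
--     if number_of_layers > 1:
--         items = [list(range(min_neurons, max_neurons+1))] * number_of_layers
--         layers += itertools.product(*items)
--     return layers
-- ===== SOURCE B (Python) =====
-- def GenerateNeurons(number_of_layers=1, min_neurons=3, max_neurons=50):
--     result = [(i,) for i in range(min_neurons, max_neurons + 1)]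
--     if number_of_layers > 1:
--         m = max_neurons - min_neurons + 1
--         if m > 0:
--             for idx in range(m ** number_of_layers):
--                 digits = []
--                 x = idx
--                 for _ in range(number_of_layers):
--                     x, d = divmod(x, m)
--                     digits.append(min_neurons + d)
--                 result.append(tuple(reversed(digits)))
--     return result
-- ===== Notes on version B (the rewrite author's own statement) =====
-- stated objective: alternative
-- what changed: Instead of building the Cartesian product by accumulation (itertools.product), B computes each multi-layer tuple independently by decoding a flat index 0..m^n-1 into base-m digits (rightmost digit fastest), which reproduces product's lexicographic order by arithmetic.
import Mathlib
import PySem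

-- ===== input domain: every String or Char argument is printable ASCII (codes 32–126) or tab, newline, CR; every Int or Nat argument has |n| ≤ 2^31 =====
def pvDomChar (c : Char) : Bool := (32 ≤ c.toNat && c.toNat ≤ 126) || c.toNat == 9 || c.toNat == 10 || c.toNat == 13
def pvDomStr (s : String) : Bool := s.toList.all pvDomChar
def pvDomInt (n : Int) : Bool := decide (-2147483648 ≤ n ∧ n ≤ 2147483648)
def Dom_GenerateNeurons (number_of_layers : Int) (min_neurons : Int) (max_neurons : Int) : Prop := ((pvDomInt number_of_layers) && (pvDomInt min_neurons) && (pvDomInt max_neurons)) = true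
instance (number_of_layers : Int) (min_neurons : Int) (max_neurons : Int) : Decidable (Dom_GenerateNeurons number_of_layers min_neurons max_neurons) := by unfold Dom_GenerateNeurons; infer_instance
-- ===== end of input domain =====

-- B replaces itertools.product by base-m decoding of a flat index per tuple (alternative, not faster).

-- ===== PORT A =====
-- itertools.product of n copies of a pool, leftmost coordinate varying slowest
-- (the library call, ported as the corresponding function).
def pvProductRep (vals : List Int) : Nat → List (List Int)
  | 0 => [[]]
  | k + 1 => vals.flatMap (fun v => (pvProductRep vals k).map (fun t => v :: t))

def GenerateNeurons (number_of_layers : Int) (min_neurons : Int) (max_neurons : Int) : List (List Int) :=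
  -- layers = []; for i in range(min, max+1): layers.append((i,))
  let layers := (PySem.List.pyRange min_neurons (max_neurons + 1) 1).foldl
      (fun acc i => acc ++ [[i]]) []
  if number_of_layers > 1 then
    layers ++ pvProductRep (PySem.List.pyRange min_neurons (max_neurons + 1) 1) number_of_layers.toNat
  else layers

-- ===== PORT B =====
-- inner loop: for _ in range(n): x, d = divmod(x, m); digits.append(min_neurons + d)
def pvDecodeLoop (m lo : Int) : Nat → Int → List Int → List Int
  | 0, _, digits => digits
  | k + 1, x, digits =>
      pvDecodeLoop m lo k (PySem.Int.floordiv x m) (digits ++ [lo + PySem.Int.mod x m])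

def GenerateNeurons_alt (number_of_layers : Int) (min_neurons : Int) (max_neurons : Int) : List (List Int) :=
  let result := (PySem.List.pyRange min_neurons (max_neurons + 1) 1).map (fun i => [i])
  if number_of_layers > 1 then
    let m := max_neurons - min_neurons + 1
    if m > 0 then
      result ++ (PySem.List.pyRange 0 (m ^ number_of_layers.toNat) 1).map
        (fun idx => (pvDecodeLoop m min_neurons number_of_layers.toNat idx []).reverse)
    else result
  else result

-- ===== PRECONDITION & SPEC =====
def Spec_GenerateNeurons (number_of_layers : Int) (min_neurons : Int) (max_neurons : Int) (out : List (List Int)) : Prop := out = GenerateNeurons_alt number_of_layers min_neurons max_neurons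
instance (number_of_layers : Int) (min_neurons : Int) (max_neurons : Int) (out : List (List Int)) : Decidable (Spec_GenerateNeurons number_of_layers min_neurons max_neurons out) := by unfold Spec_GenerateNeurons; infer_instance

-- ===== CLAIM (what is proved, stated in full; the proofs are below) =====
def Claim_equal_GenerateNeurons : Prop := ∀ (number_of_layers : Int) (min_neurons : Int) (max_neurons : Int), Dom_GenerateNeurons number_of_layers min_neurons max_neurons → Spec_GenerateNeurons number_of_layers min_neurons max_neurons (GenerateNeurons number_of_layers min_neurons max_neurons)

-- ===== LEMMAS AND PROOFS =====

-- little-endian digit stream of the decode loop, without the accumulator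
def pvD (m lo : Int) : Nat → Int → List Int
  | 0, _ => []
  | k + 1, x => (lo + PySem.Int.mod x m) :: pvD m lo k (PySem.Int.floordiv x m)

theorem pvDecodeLoop_eq (m lo : Int) (k : Nat) (x : Int) (t : List Int) :
    pvDecodeLoop m lo k x t = t ++ pvD m lo k x := by
  induction k generalizing x t with
  | zero => simp [pvDecodeLoop, pvD]
  | succ k ih => simp [pvDecodeLoop, pvD, ih]

theorem foldl_append_singletons (l : List Int) (acc : List (List Int)) :
    l.foldl (fun acc i => acc ++ [[i]]) acc = acc ++ l.map (fun i => [i]) := by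
  induction l generalizing acc with
  | nil => simp
  | cons x xs ih => simp [List.foldl, ih]

theorem pvProductRep_nil (k : Nat) : pvProductRep [] (k + 1) = [] := by
  simp [pvProductRep]

theorem range_mul_flatMap (a b : Nat) :
    List.range (a * b) = (List.range a).flatMap (fun i => (List.range b).map (fun j => i * b + j)) := by
  induction a with
  | zero => simp
  | succ a ih =>
      rw [Nat.succ_mul, List.range_add, List.range_succ, List.flatMap_append, ih]
      simp

-- decoding v*m^k + x prepends digit v at the most significant (last little-endian) place
theorem flatMap_congr_mem {α β : Type} (l : List α) (f g : α → List β)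
    (h : ∀ a ∈ l, f a = g a) : l.flatMap f = l.flatMap g := by
  induction l with
  | nil => rfl
  | cons x xs ih =>
      simp only [List.flatMap_cons]
      rw [h x (by simp), ih (fun a ha => h a (by simp [ha]))]

theorem pvD_mul_add (m lo : Int) (hm : 0 < m) (k : Nat) (v x : Int)
    (hv0 : 0 ≤ v) (hv : v < m) (hx0 : 0 ≤ x) (hx : x < m ^ k) :
    pvD m lo (k + 1) (v * m ^ k + x) = pvD m lo k x ++ [lo + v] := by
  induction k generalizing x with
  | zero =>
      have hx1 : x < 1 := by simpa using hx
      have hx0' : x = 0 := by omega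
      subst hx0'
      simp [pvD, PySem.Int.mod_eq_emod_of_pos hm, Int.emod_eq_of_lt hv0 hv]
  | succ k ih =>
      have hmod : PySem.Int.mod (v * m ^ (k + 1) + x) m = PySem.Int.mod x m := by
        rw [PySem.Int.mod_eq_emod_of_pos hm, PySem.Int.mod_eq_emod_of_pos hm]
        have h1 : v * m ^ (k + 1) + x = x + m * (v * m ^ k) := by ring
        rw [h1, Int.add_mul_emod_self_left]
      have hdiv : PySem.Int.floordiv (v * m ^ (k + 1) + x) m = v * m ^ k + x / m := by
        rw [PySem.Int.floordiv_eq_ediv_of_pos hm]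
        have h1 : v * m ^ (k + 1) + x = x + (v * m ^ k) * m := by ring
        rw [h1, Int.add_mul_ediv_right _ _ (by omega : m ≠ 0)]
        ring
      have hq0 : 0 ≤ x / m := Int.ediv_nonneg hx0 hm.le
      have hq : x / m < m ^ k :=
        Int.ediv_lt_of_lt_mul hm (by calc x < m ^ (k + 1) := hx
                                        _ = m ^ k * m := by ring)
      show pvD m lo (k + 2) (v * m ^ (k + 1) + x) = pvD m lo (k + 1) x ++ [lo + v]
      rw [show pvD m lo (k + 2) (v * m ^ (k + 1) + x)
            = (lo + PySem.Int.mod (v * m ^ (k + 1) + x) m)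
              :: pvD m lo (k + 1) (PySem.Int.floordiv (v * m ^ (k + 1) + x) m) from rfl]
      rw [hmod, hdiv, ih (x / m) hq0 hq]
      rw [show pvD m lo (k + 1) x
            = (lo + PySem.Int.mod x m) :: pvD m lo k (PySem.Int.floordiv x m) from rfl]
      rw [PySem.Int.floordiv_eq_ediv_of_pos hm]
      simp

-- the product of k copies of [lo, lo+m) is the base-m decode of indices 0..m^k-1
theorem pvProductRep_eq_decode (lo : Int) (M : Nat) (hM : 0 < M) (k : Nat) :
    pvProductRep (PySem.List.pyRange lo (lo + (M : Int)) 1) k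
      = (PySem.List.pyRange 0 ((M : Int) ^ k) 1).map (fun idx => (pvD (M : Int) lo k idx).reverse) := by
  have hrange : ∀ (N : Nat), PySem.List.pyRange 0 (N : Int) 1 = (List.range N).map (fun (j : Nat) => (j : Int)) := by
    intro N
    rw [PySem.List.pyRange_one]
    simp only [sub_zero, Int.toNat_natCast, zero_add]
  induction k with
  | zero =>
      rw [show ((M : Int)) ^ 0 = 0 + 1 from by ring, PySem.List.pyRange_one_singleton]
      simp [pvProductRep, pvD]
  | succ k ih =>
      have hvals : PySem.List.pyRange lo (lo + (M : Int)) 1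
          = (List.range M).map (fun (i : Nat) => lo + (i : Int)) := by
        rw [PySem.List.pyRange_one]
        simp only [add_sub_cancel_left, Int.toNat_natCast]
      have hcast : ((M : Int)) ^ (k + 1) = ((M ^ (k + 1) : Nat) : Int) := by push_cast; ring
      have hcastk : ((M : Int)) ^ k = ((M ^ k : Nat) : Int) := by push_cast; ring
      rw [show pvProductRep (PySem.List.pyRange lo (lo + (M : Int)) 1) (k + 1)
            = (PySem.List.pyRange lo (lo + (M : Int)) 1).flatMap
                (fun v => (pvProductRep (PySem.List.pyRange lo (lo + (M : Int)) 1) k).map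
                  (fun t => v :: t)) from rfl]
      rw [ih, hvals, hcast, hcastk, hrange, hrange]
      rw [show M ^ (k + 1) = M * M ^ k from by ring, range_mul_flatMap]
      rw [List.flatMap_map, List.map_flatMap, List.map_flatMap]
      refine flatMap_congr_mem _ _ _ ?_
      intro i hi
      simp only [List.map_map]
      refine List.map_congr_left ?_
      intro j hj
      simp only [Function.comp]
      have hi' : (i : Int) < M := by exact_mod_cast List.mem_range.mp hi
      have hj0 : (0 : Int) ≤ (j : Int) := by positivity
      have hj' : (j : Int) < (M : Int) ^ k := by
        rw [hcastk]; exact_mod_cast List.mem_range.mp hj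
      have hc : ((i * M ^ k + j : Nat) : Int) = (i : Int) * (M : Int) ^ k + (j : Int) := by
        push_cast; ring
      rw [hc, pvD_mul_add _ _ (by exact_mod_cast hM) k _ _ (by positivity) hi' hj0 hj']
      simp

-- ===== VERDICT (by name: the statement is the Claim_ definition above) =====
theorem GenerateNeurons_spec : Claim_equal_GenerateNeurons := by
  intro n lo hi _
  show GenerateNeurons n lo hi = GenerateNeurons_alt n lo hi
  unfold GenerateNeurons GenerateNeurons_alt
  rw [foldl_append_singletons]
  simp only [List.nil_append]
  by_cases hn : n > 1
  · simp only [if_pos hn]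
    by_cases hm : hi - lo + 1 > 0
    · simp only [if_pos hm]
      have hM : hi + 1 = lo + ((hi - lo + 1).toNat : Int) := by omega
      have hMpos : 0 < (hi - lo + 1).toNat := by omega
      have hmc : hi - lo + 1 = ((hi - lo + 1).toNat : Int) := by omega
      congr 1
      rw [hM, pvProductRep_eq_decode lo _ hMpos]
      rw [← hmc]
      apply List.map_congr_left
      intro idx _
      rw [pvDecodeLoop_eq]
      simp
    · simp only [if_neg hm]
      have hnil : PySem.List.pyRange lo (hi + 1) 1 = [] :=
        PySem.List.pyRange_one_eq_nil (by omega)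
      have hk : ∃ k, n.toNat = k + 1 := ⟨n.toNat - 1, by omega⟩
      obtain ⟨k, hk⟩ := hk
      rw [hnil, hk, pvProductRep_nil]
      simp
  · simp [if_neg hn]
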